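-- pv_equiv track=rewrite | github.com/MarcBejjani/IDPA_Project | contentHelper.py | normalizeVectors
-- ===== SOURCE A (Python) =====
-- def normalizeVectors(vectorA, vectorB):
--     elementsA = []; elementsB = []
--     for x in vectorA:
--         elementsA.append(x)
--     for x in vectorB:
--         elementsB.append(x)
--
--     for el in elementsA:
--         if el not in vectorB:
--             vectorB[el] = 0
--     for el in elementsB:
--         if el not in vectorA:
--             vectorA[el] = 0
--
--     return vectorA, vectorB
-- ===== SOURCE B (Python) =====
-- def normalizeVectors(vectorA, vectorB):
--     def merged(primary, secondary):
--         out = {}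
--         for k in list(primary) + list(secondary):
--             if k not in out:
--                 out[k] = primary[k] if k in primary else 0
--         return out
--     return merged(vectorA, vectorB), merged(vectorB, vectorA)
-- ===== Notes on version B (the rewrite author's own statement) =====
-- stated objective: alternative
-- what changed: Instead of snapshotting each dict's keys and patching the two input dicts in place with missing-zero loops, B rebuilds each result from scratch by one deduplicating scan over the concatenated key stream primary+secondary, choosing primary's value when present and 0 otherwise; B does not mutate its arguments (return-value equivalence).
import Mathlib
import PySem

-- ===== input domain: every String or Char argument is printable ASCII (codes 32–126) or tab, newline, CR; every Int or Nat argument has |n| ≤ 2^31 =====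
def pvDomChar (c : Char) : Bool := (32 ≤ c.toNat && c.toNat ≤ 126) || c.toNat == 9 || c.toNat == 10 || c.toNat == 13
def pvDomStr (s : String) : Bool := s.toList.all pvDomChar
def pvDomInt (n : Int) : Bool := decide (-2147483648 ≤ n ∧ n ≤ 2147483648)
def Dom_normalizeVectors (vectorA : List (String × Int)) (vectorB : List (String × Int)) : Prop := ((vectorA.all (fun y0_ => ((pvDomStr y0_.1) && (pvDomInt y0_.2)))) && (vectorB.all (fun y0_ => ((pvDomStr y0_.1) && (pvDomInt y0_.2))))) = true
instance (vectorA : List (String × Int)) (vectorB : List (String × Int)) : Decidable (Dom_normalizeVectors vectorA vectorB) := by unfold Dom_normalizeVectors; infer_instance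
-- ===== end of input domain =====

-- B rebuilds each result dict from scratch by one deduplicating scan over the concatenated key
-- stream (alternative decomposition). A mutates both argument dicts in place, B does not: the
-- equivalence proved here is about the RETURN value only.

-- ===== PORT A =====
def normalizeVectors (vectorA : List (String × Int)) (vectorB : List (String × Int)) : (List (String × Int)) × (List (String × Int)) :=
  let dA := PySem.Dict.ofList vectorA
  let dB := PySem.Dict.ofList vectorB
  -- elementsA = []; for x in vectorA: elementsA.append(x)   (iterating a dict yields its keys)
  let elementsA := dA.keys
  let elementsB := dB.keys
  -- for el in elementsA: if el not in vectorB: vectorB[el] = 0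
  let dB' := elementsA.foldl (fun d el => if d.contains el then d else d.insert el 0) dB
  -- for el in elementsB: if el not in vectorA: vectorA[el] = 0
  let dA' := elementsB.foldl (fun d el => if d.contains el then d else d.insert el 0) dA
  (dA'.items, dB'.items)

-- ===== PORT B =====
-- merged(primary, secondary): out = {}; for k in list(primary) + list(secondary):
--   if k not in out: out[k] = primary[k] if k in primary else 0
def mergedAlt (primary secondary : PySem.Dict String Int) : PySem.Dict String Int :=
  (primary.keys ++ secondary.keys).foldl
    (fun out k => if out.contains k then out
                  else out.insert k (if primary.contains k then primary.getD k 0 else 0))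
    PySem.Dict.empty

def normalizeVectors_alt (vectorA : List (String × Int)) (vectorB : List (String × Int)) : (List (String × Int)) × (List (String × Int)) :=
  let dA := PySem.Dict.ofList vectorA
  let dB := PySem.Dict.ofList vectorB
  ((mergedAlt dA dB).items, (mergedAlt dB dA).items)

-- ===== PRECONDITION & SPEC =====
def Spec_normalizeVectors (vectorA : List (String × Int)) (vectorB : List (String × Int)) (out : (List (String × Int)) × (List (String × Int))) : Prop := out = normalizeVectors_alt vectorA vectorB
instance (vectorA : List (String × Int)) (vectorB : List (String × Int)) (out : (List (String × Int)) × (List (String × Int))) : Decidable (Spec_normalizeVectors vectorA vectorB out) := by unfold Spec_normalizeVectors; infer_instance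

-- ===== CLAIM (what is proved, stated in full; the proofs are below) =====
def Claim_equal_normalizeVectors : Prop := ∀ (vectorA : List (String × Int)) (vectorB : List (String × Int)), Dom_normalizeVectors vectorA vectorB → Spec_normalizeVectors vectorA vectorB (normalizeVectors vectorA vectorB)

-- ===== LEMMAS AND PROOFS =====

-- A guarded insert loop over a duplicate-free key list appends exactly the filtered fresh keys.
lemma foldG_items (l : List String) (d : PySem.Dict String Int) (f : String → Int) (hl : l.Nodup) :
    (l.foldl (fun out k => if out.contains k then out else out.insert k (f k)) d).items
      = d.items ++ (l.filter (fun k => !(d.contains k))).map (fun k => (k, f k)) := by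
  induction l generalizing d with
  | nil => simp
  | cons k l ih =>
    rcases List.nodup_cons.mp hl with ⟨hk, hl'⟩
    by_cases h : d.contains k = true
    · simp [List.foldl_cons, h, ih d hl']
    · have h' : d.contains k = false := by simpa using h
      have hins : (d.insert k (f k)).items = d.items ++ [(k, f k)] :=
        PySem.Dict.items_insert_of_not_contains d (f k) h'
      have hfilt : l.filter (fun x => !((d.insert k (f k)).contains x))
          = l.filter (fun x => !(d.contains x)) := by
        apply List.filter_congr
        intro x hx
        have hxk : x ≠ k := fun e => hk (e ▸ hx)
        simp [PySem.Dict.contains_insert, hxk]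
      simp [List.foldl_cons, h', ih _ hl', hins, hfilt]

-- Phase 1 of B's scan (the primary keys, from an empty dict) rebuilds the primary dict itself.
lemma mergedAlt_phase1 (primary : PySem.Dict String Int) (hp : primary.keys.Nodup) :
    primary.keys.foldl
      (fun out k => if out.contains k then out
                    else out.insert k (if primary.contains k then primary.getD k 0 else 0))
      PySem.Dict.empty = primary := by
  apply PySem.Dict.ext
  rw [foldG_items _ _ _ hp]
  have hfilt : primary.keys.filter (fun k => !((PySem.Dict.empty : PySem.Dict String Int).contains k))
      = primary.keys := by
    apply List.filter_eq_self.mpr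
    intro x _
    simp [PySem.Dict.contains_empty]
  rw [hfilt]
  have hmap : primary.keys.map
      (fun k => (k, if primary.contains k then primary.getD k 0 else 0))
      = primary.keys.map (fun k => (k, primary.getD k 0)) := by
    apply List.map_congr_left
    intro k hk
    have : primary.contains k = true := (PySem.Dict.contains_iff_mem_keys _ _).mpr hk
    simp [this]
  rw [hmap, ← PySem.Dict.items_eq_map_keys primary hp 0]
  simp [PySem.Dict.empty]

-- B's whole scan: primary's items followed by zeros for secondary's keys missing from primary.
lemma mergedAlt_items (primary secondary : PySem.Dict String Int)
    (hp : primary.keys.Nodup) (hs : secondary.keys.Nodup) :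
    (mergedAlt primary secondary).items
      = primary.items
        ++ (secondary.keys.filter (fun k => !(primary.contains k))).map (fun k => (k, (0 : Int))) := by
  unfold mergedAlt
  rw [List.foldl_append, mergedAlt_phase1 primary hp, foldG_items _ _ _ hs]
  congr 1
  apply List.map_congr_left
  intro k hk
  have : primary.contains k = false := by simpa using (List.mem_filter.mp hk).2
  simp [this]

lemma norm_eq (vectorA vectorB : List (String × Int)) :
    normalizeVectors vectorA vectorB = normalizeVectors_alt vectorA vectorB := by
  have hA : (PySem.Dict.ofList vectorA).keys.Nodup := PySem.Dict.nodup_keys_ofList vectorA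
  have hB : (PySem.Dict.ofList vectorB).keys.Nodup := PySem.Dict.nodup_keys_ofList vectorB
  unfold normalizeVectors normalizeVectors_alt
  refine Prod.ext ?_ ?_
  · simpa using
      (foldG_items (PySem.Dict.ofList vectorB).keys (PySem.Dict.ofList vectorA) (fun _ => 0) hB).trans
        (mergedAlt_items (PySem.Dict.ofList vectorA) (PySem.Dict.ofList vectorB) hA hB).symm
  · simpa using
      (foldG_items (PySem.Dict.ofList vectorA).keys (PySem.Dict.ofList vectorB) (fun _ => 0) hA).trans
        (mergedAlt_items (PySem.Dict.ofList vectorB) (PySem.Dict.ofList vectorA) hB hA).symm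

-- ===== VERDICT (by name: the statement is the Claim_ definition above) =====
theorem normalizeVectors_spec : Claim_equal_normalizeVectors := by
  intro vectorA vectorB _
  exact norm_eq vectorA vectorB
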